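-- pv_equiv track=rewrite | github.com/evanKanon/Thesis_code | eons_compound/script5.6.py | newhamming
-- ===== SOURCE A (Python) =====
-- def newhamming(N1, N2, thr):
-- 	list1=[]
-- 	list2=[]
-- 	for (f,t,d) in N1:
-- 		b=(f,t,d)
-- 		if d<=thr: b=b[:2]+(0,)
-- 		list1.append(b)
-- 	for (f,t,d) in N2:
-- 		b=(f,t,d)
-- 		if d<=thr: b=b[:2]+(0,)
-- 		list2.append(b)
-- 	df=0
-- 	for (f,t,d) in list1:
-- 		for (f2,t2,d2) in list2:
-- 			if f==f2 and t==t2 and d!=0 and d2==0 : df+=1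
-- 			if f==f2 and t==t2 and d==0 and d2!=0 : df+=1
-- 	return df
-- ===== SOURCE B (Python) =====
-- def newhamming(N1, N2, thr):
--     # One pass over N2: count, per (f, t) key, how many edges are zero after
--     # thresholding (d <= thr or d == 0) and how many are not; then one pass
--     # over N1 adding the opposite-class count for each edge's key.
--     zkeys = [(f, t) for (f, t, d) in N2 if d <= thr or d == 0]
--     nkeys = [(f, t) for (f, t, d) in N2 if not (d <= thr or d == 0)]
--     zc = {}
--     for k in zkeys:
--         zc[k] = zc.get(k, 0) + 1
--     nc = {}
--     for k in nkeys:
--         nc[k] = nc.get(k, 0) + 1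
--     df = 0
--     for (f, t, d) in N1:
--         if d <= thr or d == 0:
--             df += nc.get((f, t), 0)
--         else:
--             df += zc.get((f, t), 0)
--     return df
-- ===== Notes on version B (the rewrite author's own statement) =====
-- stated objective: faster
-- what changed: Replaced the quadratic all-pairs scan with a hash grouping: one pass over N2 counts zero/nonzero edges per (f,t) key, then one pass over N1 adds the opposite-class count for each edge.
import Mathlib
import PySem

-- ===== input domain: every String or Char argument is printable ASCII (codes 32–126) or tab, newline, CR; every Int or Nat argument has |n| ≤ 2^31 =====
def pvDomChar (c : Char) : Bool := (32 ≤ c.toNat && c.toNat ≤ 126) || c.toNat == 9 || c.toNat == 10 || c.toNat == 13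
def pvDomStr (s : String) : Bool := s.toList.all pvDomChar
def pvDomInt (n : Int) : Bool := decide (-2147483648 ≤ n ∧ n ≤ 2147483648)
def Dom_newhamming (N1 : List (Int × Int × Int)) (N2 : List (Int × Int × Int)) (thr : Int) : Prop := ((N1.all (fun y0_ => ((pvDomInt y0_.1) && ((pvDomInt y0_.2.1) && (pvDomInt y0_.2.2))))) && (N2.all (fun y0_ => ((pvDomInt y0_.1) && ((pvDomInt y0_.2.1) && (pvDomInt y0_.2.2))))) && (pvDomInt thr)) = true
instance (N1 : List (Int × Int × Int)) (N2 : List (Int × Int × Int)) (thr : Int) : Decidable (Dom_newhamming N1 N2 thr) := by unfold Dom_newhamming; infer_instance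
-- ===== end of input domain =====

-- B replaces A's quadratic all-pairs scan by per-(f,t) zero/nonzero counting in hash maps (faster, asymptotic).

-- ===== PORT A =====
def newhamming (N1 : List (Int × Int × Int)) (N2 : List (Int × Int × Int)) (thr : Int) : Int :=
  let list1 := N1.foldl (fun acc b =>
    acc ++ [if b.2.2 ≤ thr then (b.1, b.2.1, (0 : Int)) else b]) []
  let list2 := N2.foldl (fun acc b =>
    acc ++ [if b.2.2 ≤ thr then (b.1, b.2.1, (0 : Int)) else b]) []
  list1.foldl (fun df e1 =>
    list2.foldl (fun df e2 =>
      let df := if e1.1 = e2.1 ∧ e1.2.1 = e2.2.1 ∧ e1.2.2 ≠ 0 ∧ e2.2.2 = 0 then df + 1 else df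
      if e1.1 = e2.1 ∧ e1.2.1 = e2.2.1 ∧ e1.2.2 = 0 ∧ e2.2.2 ≠ 0 then df + 1 else df) df) 0

-- ===== PORT B =====
def newhamming_alt (N1 : List (Int × Int × Int)) (N2 : List (Int × Int × Int)) (thr : Int) : Int :=
  let zkeys := (N2.filter (fun e => decide (e.2.2 ≤ thr) || decide (e.2.2 = 0))).map (fun e => (e.1, e.2.1))
  let nkeys := (N2.filter (fun e => !(decide (e.2.2 ≤ thr) || decide (e.2.2 = 0)))).map (fun e => (e.1, e.2.1))
  let zc := zkeys.foldl (fun d k => d.insert k (d.getD k 0 + 1)) (PySem.Dict.empty : PySem.Dict (Int × Int) Int)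
  let nc := nkeys.foldl (fun d k => d.insert k (d.getD k 0 + 1)) (PySem.Dict.empty : PySem.Dict (Int × Int) Int)
  N1.foldl (fun df e =>
    if e.2.2 ≤ thr ∨ e.2.2 = 0 then df + nc.getD (e.1, e.2.1) 0
    else df + zc.getD (e.1, e.2.1) 0) 0

-- ===== PRECONDITION & SPEC =====
def Spec_newhamming (N1 : List (Int × Int × Int)) (N2 : List (Int × Int × Int)) (thr : Int) (out : Int) : Prop := out = newhamming_alt N1 N2 thr
instance (N1 : List (Int × Int × Int)) (N2 : List (Int × Int × Int)) (thr : Int) (out : Int) : Decidable (Spec_newhamming N1 N2 thr out) := by unfold Spec_newhamming; infer_instance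

-- ===== CLAIM (what is proved, stated in full; the proofs are below) =====
def Claim_equal_newhamming : Prop := ∀ (N1 : List (Int × Int × Int)) (N2 : List (Int × Int × Int)) (thr : Int), Dom_newhamming N1 N2 thr → Spec_newhamming N1 N2 thr (newhamming N1 N2 thr)

-- ===== LEMMAS AND PROOFS =====

-- thresholding map used by A
def nhG (thr : Int) (b : Int × Int × Int) : Int × Int × Int :=
  if b.2.2 ≤ thr then (b.1, b.2.1, (0 : Int)) else b

-- "zero after thresholding" test used by B
def nhZ (thr : Int) (e : Int × Int × Int) : Bool :=
  decide (e.2.2 ≤ thr) || decide (e.2.2 = 0)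

theorem nhG_key (thr : Int) (e : Int × Int × Int) :
    (nhG thr e).1 = e.1 ∧ (nhG thr e).2.1 = e.2.1 := by
  unfold nhG; split <;> simp

-- A's inner loop counts the key-matched, xor-zero partners of e1
theorem nh_inner (e1 : Int × Int × Int) (l : List (Int × Int × Int)) (df : Int) :
    l.foldl (fun df e2 =>
      let df := if e1.1 = e2.1 ∧ e1.2.1 = e2.2.1 ∧ e1.2.2 ≠ 0 ∧ e2.2.2 = 0 then df + 1 else df
      if e1.1 = e2.1 ∧ e1.2.1 = e2.2.1 ∧ e1.2.2 = 0 ∧ e2.2.2 ≠ 0 then df + 1 else df) df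
    = df + (l.countP (fun e2 =>
        (e1.1 == e2.1 && e1.2.1 == e2.2.1) && ((e1.2.2 == 0) != (e2.2.2 == 0))) : Int) := by
  induction l generalizing df with
  | nil => simp
  | cons h t ih =>
    rw [List.foldl_cons, ih, List.countP_cons]
    by_cases p1 : e1.1 = h.1 <;> by_cases p2 : e1.2.1 = h.2.1 <;>
      by_cases z1 : e1.2.2 = 0 <;> by_cases z2 : h.2.2 = 0 <;>
      simp [p1, p2, z1, z2] <;> ring

-- boolean form of nhG_zero
theorem nhG_zero_beq (thr : Int) (e : Int × Int × Int) :
    ((nhG thr e).2.2 == 0) = nhZ thr e := by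
  unfold nhG nhZ
  split <;> rename_i h <;> simp [beq_eq_decide, h]

-- the key-match-and-xor-zero predicate both programs count
def nhQ (thr : Int) (e1 e2 : Int × Int × Int) : Bool :=
  (e1.1 == e2.1 && e1.2.1 == e2.2.1) && (nhZ thr e1 != nhZ thr e2)

theorem A_eq (N1 N2 : List (Int × Int × Int)) (thr : Int) :
    newhamming N1 N2 thr
      = N1.foldl (fun df e1 => df + (N2.countP (nhQ thr e1) : Int)) 0 := by
  unfold newhamming
  simp only [PySem.List.foldl_append_singleton_eq_map, List.nil_append]
  rw [List.foldl_map]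
  apply PySem.List.foldl_congr_mem
  intro acc x _
  have hx : (if x.2.2 ≤ thr then (x.1, x.2.1, (0 : Int)) else x) = nhG thr x := rfl
  rw [hx, nh_inner, List.countP_map]
  have hc : List.countP ((fun e2 => (nhG thr x).1 == e2.1 && (nhG thr x).2.1 == e2.2.1 &&
        ((nhG thr x).2.2 == 0) != (e2.2.2 == 0)) ∘
        fun b => if b.2.2 ≤ thr then (b.1, b.2.1, (0 : Int)) else b) N2
      = List.countP (nhQ thr x) N2 := by
    apply List.countP_congr
    intro e2 _
    have he : (if e2.2.2 ≤ thr then (e2.1, e2.2.1, (0 : Int)) else e2) = nhG thr e2 := rfl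
    rw [Function.comp_apply, he, nhG_zero_beq, nhG_zero_beq, nhQ,
      (nhG_key thr x).1, (nhG_key thr x).2, (nhG_key thr e2).1, (nhG_key thr e2).2]
  rw [hc]

theorem B_eq (N1 N2 : List (Int × Int × Int)) (thr : Int) :
    newhamming_alt N1 N2 thr
      = N1.foldl (fun df e1 => df + (N2.countP (nhQ thr e1) : Int)) 0 := by
  unfold newhamming_alt
  apply PySem.List.foldl_congr_mem
  intro acc e1 _
  congr 1
  by_cases hz : e1.2.2 ≤ thr ∨ e1.2.2 = 0
  · rw [if_pos hz, PySem.Dict.getD_foldl_insert_add_one, PySem.Dict.getD_empty]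
    have : ((N2.filter fun e => !(decide (e.2.2 ≤ thr) || decide (e.2.2 = 0))).map
        (fun e => (e.1, e.2.1))).count (e1.1, e1.2.1)
        = N2.countP (nhQ thr e1) := by
      rw [List.count_eq_countP, List.countP_map, List.countP_filter]
      apply List.countP_congr
      intro e2 _
      unfold nhQ nhZ
      have hz1 : (decide (e1.2.2 ≤ thr) || decide (e1.2.2 = 0)) = true := by
        simpa using hz
      rw [hz1]
      by_cases a : e1.1 = e2.1 <;> by_cases b : e1.2.1 = e2.2.1 <;>
        by_cases c : e2.2.2 ≤ thr <;> by_cases d : e2.2.2 = 0 <;>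
        simp [beq_eq_decide, a, b, c, d, eq_comm]
    omega
  · rw [if_neg hz, PySem.Dict.getD_foldl_insert_add_one, PySem.Dict.getD_empty]
    have : ((N2.filter fun e => (decide (e.2.2 ≤ thr) || decide (e.2.2 = 0))).map
        (fun e => (e.1, e.2.1))).count (e1.1, e1.2.1)
        = N2.countP (nhQ thr e1) := by
      rw [List.count_eq_countP, List.countP_map, List.countP_filter]
      apply List.countP_congr
      intro e2 _
      unfold nhQ nhZ
      have hz1 : (decide (e1.2.2 ≤ thr) || decide (e1.2.2 = 0)) = false := by
        simpa using hz
      rw [hz1]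
      by_cases a : e1.1 = e2.1 <;> by_cases b : e1.2.1 = e2.2.1 <;>
        by_cases c : e2.2.2 ≤ thr <;> by_cases d : e2.2.2 = 0 <;>
        simp [beq_eq_decide, a, b, c, d, eq_comm]
    omega

-- ===== VERDICT (by name: the statement is the Claim_ definition above) =====
theorem newhamming_spec : Claim_equal_newhamming := by
  intro N1 N2 thr _
  unfold Spec_newhamming
  rw [A_eq, B_eq]
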